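-- pv_equiv track=rewrite | github.com/faisalanjum/EventTrader | scripts/earnings/build_prior_financials.py | dedupe_facts
-- ===== SOURCE A (Python) =====
-- def dedupe_facts(facts: list[dict]) -> list[dict]:
--     """Dedupe by (qname, context_id, unit_ref). Highest decimals wins."""
--     seen: dict[tuple, dict] = {}
--     for f in facts:
--         key = (f["concept"], f.get("context_id", ""), f.get("unit_ref", ""))
--         if key not in seen:
--             seen[key] = f
--         else:
--             existing_dec = _parse_decimals(seen[key].get("decimals"))
--             new_dec = _parse_decimals(f.get("decimals"))
--             if new_dec > existing_dec:
--                 seen[key] = f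
--             elif new_dec == existing_dec:
--                 # Tie-break: more significant digits in value string
--                 existing_sigfigs = len((seen[key].get("value") or "").replace("-", "").replace(".", "").lstrip("0"))
--                 new_sigfigs = len((f.get("value") or "").replace("-", "").replace(".", "").lstrip("0"))
--                 if new_sigfigs > existing_sigfigs:
--                     seen[key] = f
--     return list(seen.values())
--
-- def _parse_decimals(val) -> int:
--     if val is None or val == "INF" or val == "inf":
--         return 999
--     try:
--         return int(val)
--     except (ValueError, TypeError):
--         return -99
-- ===== SOURCE B (Python) =====
-- def dedupe_facts(facts: list[dict]) -> list[dict]: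
--     """Group facts by (concept, context_id, unit_ref), then pick each group's winner with max()."""
--     groups: dict[tuple, list] = {}
--     for f in facts:
--         key = (f["concept"], f.get("context_id", ""), f.get("unit_ref", ""))
--         groups.setdefault(key, []).append(f)
--     return [max(g, key=_rank) for g in groups.values()]
--
-- def _rank(f) -> tuple:
--     digits = (f.get("value") or "").replace("-", "").replace(".", "").lstrip("0")
--     return (_parse_decimals(f.get("decimals")), len(digits))
--
-- def _parse_decimals(val) -> int:
--     if val is None or val == "INF" or val == "inf":
--         return 999
--     try:
--         return int(val)
--     except (ValueError, TypeError):
--         return -99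
-- ===== Notes on version B (the rewrite author's own statement) =====
-- stated objective: alternative
-- what changed: A's single pass that keeps one running winner per key in a dict is replaced by a two-pass decomposition: first group all facts by (concept, context_id, unit_ref) with setdefault/append, then pick each group's winner with max() under the (decimals, sigfigs) tuple key.
import Mathlib
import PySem

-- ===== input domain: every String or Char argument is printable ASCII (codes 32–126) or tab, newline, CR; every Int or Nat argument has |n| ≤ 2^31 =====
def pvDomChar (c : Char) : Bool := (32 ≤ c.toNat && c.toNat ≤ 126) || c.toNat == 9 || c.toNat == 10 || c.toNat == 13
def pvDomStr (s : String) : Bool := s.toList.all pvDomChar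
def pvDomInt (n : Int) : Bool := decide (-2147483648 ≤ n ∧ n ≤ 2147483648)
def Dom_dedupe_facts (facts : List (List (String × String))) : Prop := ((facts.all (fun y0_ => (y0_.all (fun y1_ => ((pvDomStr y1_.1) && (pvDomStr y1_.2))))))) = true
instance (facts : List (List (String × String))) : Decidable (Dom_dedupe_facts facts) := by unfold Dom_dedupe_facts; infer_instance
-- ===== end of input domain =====

-- B replaces A's single-pass keep-the-winner dict with a two-pass group-then-max decomposition (objective: alternative, same cost).

-- ===== PORT A =====
-- helpers shared by both ports (both Pythons contain the same helper code)

-- _parse_decimals(val): None / "INF" / "inf" → 999, else int(val) or -99 on ValueError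
def pvParseDecimals (val : Option String) : Int :=
  match val with
  | none => 999
  | some s =>
    if s == "INF" || s == "inf" then 999
    else match PySem.Int.ofStr? s with
         | some n => n
         | none => -99

-- len((v or "").replace("-","").replace(".","").lstrip("0")); lstrip("0") is ported by
-- hand as dropWhile (· == '0'), exact for the one-character strip set "0"
def pvSig (val : Option String) : Nat :=
  ((PySem.Str.replace (PySem.Str.replace (val.getD "") "-" "") "." "").toList.dropWhile (fun c => c == '0')).length

-- (f["concept"], f.get("context_id",""), f.get("unit_ref","")); "concept" present by Pre_
def pvKeyOf (f : List (String × String)) : String × String × String :=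
  ((PySem.Dict.mk f).getD "concept" "",
   (PySem.Dict.mk f).getD "context_id" "",
   (PySem.Dict.mk f).getD "unit_ref" "")

def pvDecOf (f : List (String × String)) : Int := pvParseDecimals ((PySem.Dict.mk f).get? "decimals")
def pvSigOf (f : List (String × String)) : Nat := pvSig ((PySem.Dict.mk f).get? "value")

-- the body of A's for-loop
def pvLoopA (seen : PySem.Dict (String × String × String) (List (String × String)))
    (f : List (String × String)) : PySem.Dict (String × String × String) (List (String × String)) :=
  let key := pvKeyOf f
  match seen.get? key with
  | none => seen.insert key f
  | some existing =>
    let existing_dec := pvDecOf existing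
    let new_dec := pvDecOf f
    if existing_dec < new_dec then seen.insert key f
    else if new_dec = existing_dec then
      (if pvSigOf existing < pvSigOf f then seen.insert key f else seen)
    else seen

def dedupe_facts (facts : List (List (String × String))) : List (List (String × String)) :=
  (facts.foldl pvLoopA PySem.Dict.empty).values

-- ===== PORT B =====
-- max(g, key=_rank) with the tuple key (_parse_decimals, sigfig-len): Python's max keeps the
-- first maximal element, i.e. replaces the running best only on a strictly greater key;
-- ported by hand as the running-best fold (exact)
def pvMaxRank (g : List (List (String × String))) : List (String × String) :=
  match g with
  | [] => []
  | h :: t =>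
    t.foldl (fun best f =>
      if pvDecOf best < pvDecOf f || (pvDecOf best == pvDecOf f && pvSigOf best < pvSigOf f)
      then f else best) h

-- groups.setdefault(key, []).append(f)
def pvLoopB (groups : PySem.Dict (String × String × String) (List (List (String × String))))
    (f : List (String × String)) : PySem.Dict (String × String × String) (List (List (String × String))) :=
  groups.modify (pvKeyOf f) [] (fun g => g ++ [f])

def dedupe_facts_alt (facts : List (List (String × String))) : List (List (String × String)) :=
  ((facts.foldl pvLoopB PySem.Dict.empty).values).map pvMaxRank

-- ===== PRECONDITION & SPEC =====
-- Pre_ excludes exactly the inputs where the Python raises KeyError: a fact without a "concept" key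
def Pre_dedupe_facts (facts : List (List (String × String))) : Prop :=
  (facts.all (fun f => (PySem.Dict.mk f).contains "concept")) = true
instance (facts : List (List (String × String))) : Decidable (Pre_dedupe_facts facts) := by unfold Pre_dedupe_facts; infer_instance

def pvWitness_dedupe_facts : (List (List (String × String))) :=
  [[("concept", "us-gaap:Revenue"), ("context_id", "c1"), ("decimals", "2"), ("value", "1.23")],
   [("concept", "us-gaap:Revenue"), ("context_id", "c1"), ("decimals", "2"), ("value", "123.4")]]

def Spec_dedupe_facts (facts : List (List (String × String))) (out : List (List (String × String))) : Prop := out = dedupe_facts_alt facts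
instance (facts : List (List (String × String))) (out : List (List (String × String))) : Decidable (Spec_dedupe_facts facts out) := by unfold Spec_dedupe_facts; infer_instance

-- ===== CLAIM (what is proved, stated in full; the proofs are below) =====
def Claim_equal_dedupe_facts : Prop := ∀ (facts : List (List (String × String))), Dom_dedupe_facts facts → Pre_dedupe_facts facts → Spec_dedupe_facts facts (dedupe_facts facts)

-- ===== LEMMAS AND PROOFS =====

-- the relation between A's running dict entry and B's group: winner of the group so far
def pvPhi (p : (String × String × String) × List (List (String × String))) :
    (String × String × String) × List (String × String) := (p.1, pvMaxRank p.2)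

-- looking up in the φ-image of an items list is looking up, then taking the winner
theorem pv_get?_map_phi (l : List ((String × String × String) × List (List (String × String))))
    (x : String × String × String) :
    (PySem.Dict.mk (l.map pvPhi)).get? x = ((PySem.Dict.mk l).get? x).map pvMaxRank := by
  induction l with
  | nil => rfl
  | cons h t ih =>
    obtain ⟨k, g⟩ := h
    simp only [List.map_cons, pvPhi, PySem.Dict.get?_mk_cons]
    by_cases hk : (k == x) = true
    · simp [hk]
    · simp [hk, ih]

-- extending a nonempty group by one fact updates its winner by that same test
theorem pv_maxRank_append (g : List (List (String × String))) (f : List (String × String))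
    (hg : g ≠ []) :
    pvMaxRank (g ++ [f]) =
      (if pvDecOf (pvMaxRank g) < pvDecOf f
         || (pvDecOf (pvMaxRank g) == pvDecOf f && pvSigOf (pvMaxRank g) < pvSigOf f)
       then f else pvMaxRank g) := by
  cases g with
  | nil => exact absurd rfl hg
  | cons h t => simp [pvMaxRank, List.foldl_append]

-- overwriting an entry with the value it already holds leaves the items list unchanged
theorem pv_map_update_eq_self {κ ν : Type} [BEq κ] [LawfulBEq κ]
    (l : List (κ × ν)) (k : κ) (v : ν)
    (hnd : (l.map Prod.fst).Nodup) (hm : (k, v) ∈ l) :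
    l.map (fun p => if p.1 == k then (k, v) else p) = l := by
  induction l with
  | nil => rfl
  | cons h t ih =>
    simp only [List.nodup_cons, List.map] at hnd
    rcases List.mem_cons.mp hm with he | ht
    · subst he
      simp only [beq_self_eq_true, if_pos, List.map_cons]
      have : ∀ p ∈ t, (fun p : κ × ν => if p.1 == k then (k, v) else p) p = p := by
        intro p hp
        have : p.1 ≠ k := by
          intro hpk
          exact hnd.1 (hpk ▸ (List.mem_map.mpr ⟨p, hp, rfl⟩))
        simp [this]
      simp [List.map_congr_left this]
    · have hk : h.1 ≠ k := by
        intro hpk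
        exact hnd.1 (hpk ▸ (List.mem_map.mpr ⟨(k, v), ht, rfl⟩))
      simp [hk, ih hnd.2 ht]

-- one loop iteration: A's dict stays the φ-image of B's group dict
theorem pv_step (idx : PySem.Dict (String × String × String) (List (List (String × String))))
    (f : List (String × String))
    (hnd : (idx.items.map Prod.fst).Nodup)
    (hne : ∀ p ∈ idx.items, p.2 ≠ []) :
    (pvLoopA (PySem.Dict.mk (idx.items.map pvPhi)) f).items = (pvLoopB idx f).items.map pvPhi := by
  have hget : (PySem.Dict.mk (idx.items.map pvPhi)).get? (pvKeyOf f)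
      = (idx.get? (pvKeyOf f)).map pvMaxRank := pv_get?_map_phi idx.items (pvKeyOf f)
  cases hc : idx.get? (pvKeyOf f) with
  | none =>
    have hgetn : (PySem.Dict.mk (idx.items.map pvPhi)).get? (pvKeyOf f) = none := by
      rw [hget, hc]; rfl
    have hcA : (PySem.Dict.mk (idx.items.map pvPhi)).contains (pvKeyOf f) = false := by
      rw [PySem.Dict.contains_eq_isSome_get?, hgetn]; rfl
    have hcB : idx.contains (pvKeyOf f) = false := by
      rw [PySem.Dict.contains_eq_isSome_get?, hc]; rfl
    simp only [pvLoopA, pvLoopB, hgetn, PySem.Dict.modify, PySem.Dict.getD_eq_get?_getD, hc]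
    rw [PySem.Dict.items_insert_of_not_contains _ _ hcA,
        PySem.Dict.items_insert_of_not_contains _ _ hcB]
    simp [pvPhi, pvMaxRank]
  | some g =>
    have hmem : (pvKeyOf f, g) ∈ idx.items := PySem.Dict.mem_items_of_get?_eq_some idx hc
    have hg : g ≠ [] := hne _ hmem
    have hgetS : (PySem.Dict.mk (idx.items.map pvPhi)).get? (pvKeyOf f) = some (pvMaxRank g) := by
      rw [hget, hc]; rfl
    have hcA : (PySem.Dict.mk (idx.items.map pvPhi)).contains (pvKeyOf f) = true := by
      rw [PySem.Dict.contains_eq_isSome_get?, hgetS]; rfl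
    have hcB : idx.contains (pvKeyOf f) = true := by
      rw [PySem.Dict.contains_eq_isSome_get?, hc]; rfl
    -- the right-hand side: B appends f to the group stored at the key
    have hrhs : (pvLoopB idx f).items.map pvPhi
        = idx.items.map (fun p => if p.1 == pvKeyOf f then (pvKeyOf f, pvMaxRank (g ++ [f])) else pvPhi p) := by
      simp only [pvLoopB, PySem.Dict.modify, PySem.Dict.getD_eq_get?_getD, hc, Option.getD_some]
      rw [PySem.Dict.items_insert_of_contains _ _ hcB, List.map_map]
      refine List.map_congr_left (fun p hp => ?_)
      by_cases hpk : p.1 = pvKeyOf f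
      · simp [hpk, pvPhi]
      · simp [hpk, pvPhi]
    -- any winner value W equal to pvMaxRank (g ++ [f]) closes the goal
    have hmain : ∀ (W : List (String × String)), W = pvMaxRank (g ++ [f]) →
        (idx.items.map pvPhi).map (fun p => if p.1 == pvKeyOf f then (pvKeyOf f, W) else p)
          = (pvLoopB idx f).items.map pvPhi := by
      intro W hW
      rw [hrhs, List.map_map]
      refine List.map_congr_left (fun p hp => ?_)
      by_cases hpk : (p.1 == pvKeyOf f) = true
      · simp [Function.comp, pvPhi, hpk, hW]
      · simp [Function.comp, pvPhi, hpk]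
    have happ := pv_maxRank_append g f hg
    simp only [pvLoopA, hgetS]
    by_cases h1 : pvDecOf (pvMaxRank g) < pvDecOf f
    · rw [if_pos h1, PySem.Dict.items_insert_of_contains _ _ hcA]
      exact hmain f (by rw [happ]; simp [h1])
    · by_cases h2 : pvDecOf f = pvDecOf (pvMaxRank g)
      · by_cases h3 : pvSigOf (pvMaxRank g) < pvSigOf f
        · rw [if_neg h1, if_pos h2, if_pos h3, PySem.Dict.items_insert_of_contains _ _ hcA]
          exact hmain f (by rw [happ]; simp [h2, h3])
        · rw [if_neg h1, if_pos h2, if_neg h3]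
          have hW : pvMaxRank g = pvMaxRank (g ++ [f]) := by rw [happ]; simp [h2, h3]
          calc (PySem.Dict.mk (idx.items.map pvPhi)).items
              = (idx.items.map pvPhi).map
                  (fun p => if p.1 == pvKeyOf f then (pvKeyOf f, pvMaxRank g) else p) := by
                refine (pv_map_update_eq_self _ _ _ ?_ ?_).symm
                · rw [List.map_map]; exact hnd
                · exact List.mem_map.mpr ⟨(pvKeyOf f, g), hmem, rfl⟩
            _ = (pvLoopB idx f).items.map pvPhi := hmain _ hW
      · rw [if_neg h1, if_neg h2]
        have h2s : pvDecOf (pvMaxRank g) ≠ pvDecOf f := fun h => h2 h.symm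
        have hW : pvMaxRank g = pvMaxRank (g ++ [f]) := by rw [happ]; simp [h1, h2s]
        calc (PySem.Dict.mk (idx.items.map pvPhi)).items
            = (idx.items.map pvPhi).map
                (fun p => if p.1 == pvKeyOf f then (pvKeyOf f, pvMaxRank g) else p) := by
              refine (pv_map_update_eq_self _ _ _ ?_ ?_).symm
              · rw [List.map_map]; exact hnd
              · exact List.mem_map.mpr ⟨(pvKeyOf f, g), hmem, rfl⟩
          _ = (pvLoopB idx f).items.map pvPhi := hmain _ hW

-- B's grouping loop keeps its keys distinct
theorem pv_loopB_nodup (idx : PySem.Dict (String × String × String) (List (List (String × String))))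
    (f : List (String × String)) (hnd : (idx.items.map Prod.fst).Nodup) :
    ((pvLoopB idx f).items.map Prod.fst).Nodup := by
  unfold pvLoopB PySem.Dict.modify
  by_cases hc : idx.contains (pvKeyOf f) = true
  · rw [PySem.Dict.items_insert_of_contains _ _ hc, List.map_map]
    have : ∀ p ∈ idx.items,
        (Prod.fst ∘ fun p : (String × String × String) × List (List (String × String)) =>
          if p.1 == pvKeyOf f then (pvKeyOf f, (idx.getD (pvKeyOf f) []) ++ [f]) else p) p = p.1 := by
      intro p hp
      by_cases hpk : p.1 = pvKeyOf f <;> simp [Function.comp, hpk]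
    rw [List.map_congr_left this]
    exact hnd
  · have hc' : idx.contains (pvKeyOf f) = false := by
      cases h : idx.contains (pvKeyOf f)
      · rfl
      · exact absurd h hc
    rw [PySem.Dict.items_insert_of_not_contains _ _ hc']
    have hk : pvKeyOf f ∉ idx.items.map Prod.fst := by
      rw [PySem.Dict.contains_eq_decide_mem_keys] at hc'
      simp only [decide_eq_false_iff_not] at hc'
      exact hc'
    simp only [List.map_append, List.map_cons, List.map_nil]
    exact (List.nodup_append).mpr ⟨hnd, List.nodup_singleton _,
      by
        intro a ha b hb
        rw [List.mem_singleton] at hb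
        subst hb
        exact fun he => hk (he ▸ ha)⟩

-- B's grouping loop keeps every group nonempty
theorem pv_loopB_ne (idx : PySem.Dict (String × String × String) (List (List (String × String))))
    (f : List (String × String)) (hne : ∀ p ∈ idx.items, p.2 ≠ []) :
    ∀ p ∈ (pvLoopB idx f).items, p.2 ≠ [] := by
  unfold pvLoopB PySem.Dict.modify
  by_cases hc : idx.contains (pvKeyOf f) = true
  · rw [PySem.Dict.items_insert_of_contains _ _ hc]
    intro p hp
    rcases List.mem_map.mp hp with ⟨q, hq, hqe⟩
    by_cases hqk : (q.1 == pvKeyOf f) = true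
    · rw [if_pos hqk] at hqe
      simp [← hqe]
    · rw [if_neg hqk] at hqe
      exact hqe ▸ hne q hq
  · have hc' : idx.contains (pvKeyOf f) = false := by
      cases h : idx.contains (pvKeyOf f)
      · rfl
      · exact absurd h hc
    rw [PySem.Dict.items_insert_of_not_contains _ _ hc']
    intro p hp
    rcases List.mem_append.mp hp with h | h
    · exact hne p h
    · simp only [List.mem_singleton] at h
      subst h
      simp

-- the loop invariant: A's dict is at all times the winner-image of B's group dict
theorem pv_invariant (facts : List (List (String × String))) :
    ∀ (idx : PySem.Dict (String × String × String) (List (List (String × String)))),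
      (idx.items.map Prod.fst).Nodup → (∀ p ∈ idx.items, p.2 ≠ []) →
      (facts.foldl pvLoopA (PySem.Dict.mk (idx.items.map pvPhi))).items
        = (facts.foldl pvLoopB idx).items.map pvPhi := by
  induction facts with
  | nil => intro idx _ _; rfl
  | cons f rest ih =>
    intro idx hnd hne
    simp only [List.foldl_cons]
    have hA : pvLoopA (PySem.Dict.mk (idx.items.map pvPhi)) f
        = PySem.Dict.mk ((pvLoopB idx f).items.map pvPhi) :=
      PySem.Dict.ext (pv_step idx f hnd hne)
    rw [hA]
    exact ih (pvLoopB idx f) (pv_loopB_nodup idx f hnd) (pv_loopB_ne idx f hne)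

-- ===== VERDICT (by name: the statement is the Claim_ definition above) =====
theorem dedupe_facts_spec : Claim_equal_dedupe_facts := by
  intro facts _ _
  unfold Spec_dedupe_facts dedupe_facts dedupe_facts_alt
  have h := pv_invariant facts PySem.Dict.empty (by simp [PySem.Dict.empty]) (by simp [PySem.Dict.empty])
  rw [show (PySem.Dict.mk (List.map pvPhi PySem.Dict.empty.items)) = PySem.Dict.empty from rfl] at h
  unfold PySem.Dict.values
  rw [h, List.map_map, List.map_map]
  rfl
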